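-- pv_equiv track=rewrite | github.com/nmontesoro/MetodosNumericos | dectostr.py | format_dec_bin_str_as_bytes
-- ===== SOURCE A (Python) =====
-- def format_dec_bin_str_as_bytes(bin_str: str) -> str:
--     """Tomo el str devuelto por dec_to_bin_str y lo separo cada 4 bits
--     (ej: 10001.110111 -> 1 0001.11 0111)
--     """
--     parts = bin_str.split('.')
--     int_str = parts[0][::-1]
--     dec_str = parts[1][::-1]
--
--     int_str = ' '.join([int_str[i:i+4] for i in range(0, len(int_str), 4)])
--     dec_str = ' '.join([dec_str[i:i+4] for i in range(0, len(dec_str), 4)])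
--
--     int_str = int_str[::-1]
--     dec_str = dec_str[::-1]
--
--     return int_str + '.' + dec_str
-- ===== SOURCE B (Python) =====
-- def _group_right(s: str) -> str:
--     """Group s into 4-char chunks aligned to the right, without reversing."""
--     r = len(s) % 4
--     chunks = [s[:r]] if r else []
--     chunks += [s[i:i+4] for i in range(r, len(s), 4)]
--     return ' '.join(chunks)
--
--
-- def format_dec_bin_str_as_bytes(bin_str: str) -> str:
--     parts = bin_str.split('.')
--     return _group_right(parts[0]) + '.' + _group_right(parts[1])
-- ===== Notes on version B (the rewrite author's own statement) =====
-- stated objective: simpler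
-- what changed: Replaces A's reverse-string -> forward 4-chunk -> join -> reverse-again trick with a helper that groups each part right-aligned directly: a len%4-sized first chunk followed by 4-char chunks at offsets r, r+4, ...; no reversals at all.
import Mathlib
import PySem

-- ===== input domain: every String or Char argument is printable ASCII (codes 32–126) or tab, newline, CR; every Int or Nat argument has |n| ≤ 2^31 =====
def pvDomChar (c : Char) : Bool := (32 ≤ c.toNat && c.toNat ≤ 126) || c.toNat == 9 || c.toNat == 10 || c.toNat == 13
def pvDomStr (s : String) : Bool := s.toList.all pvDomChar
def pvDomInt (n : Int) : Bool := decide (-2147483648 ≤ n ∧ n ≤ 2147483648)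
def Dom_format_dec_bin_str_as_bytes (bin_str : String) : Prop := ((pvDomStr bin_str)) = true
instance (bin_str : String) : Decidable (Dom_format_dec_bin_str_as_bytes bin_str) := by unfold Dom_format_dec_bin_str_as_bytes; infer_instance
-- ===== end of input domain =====

-- B rewrites A's reverse → forward 4-chunk → reverse trick as direct right-aligned
-- grouping (a len%4 first chunk, then chunks at offsets r, r+4, …); return values proved equal.

-- ===== PORT A =====
-- ' '.join([s[i:i+4] for i in range(0, len(s), 4)])
def pvGroupA (s : List Char) : List Char :=
  PySem.Chars.join [' ']
    ((PySem.List.pyRange 0 (s.length : Int) 4).map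
      (fun i => PySem.List.slice s (some i) (some (i + 4))))

def format_dec_bin_str_as_bytes (bin_str : String) : String :=
  let parts := (PySem.Chars.split? bin_str.toList ['.']).getD []
  -- parts[1] raises IndexError when bin_str has no '.'; Pre_ excludes that, so getD [] is unreachable
  let int_str := ((PySem.List.pyGet? parts 0).getD []).reverse  -- s[::-1] (slice?_none_none_neg_one)
  let dec_str := ((PySem.List.pyGet? parts 1).getD []).reverse
  let int_str2 := (pvGroupA int_str).reverse
  let dec_str2 := (pvGroupA dec_str).reverse
  String.ofList (int_str2 ++ '.' :: dec_str2)

-- ===== PORT B =====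
-- r = len(s) % 4; chunks = ([s[:r]] if r else []) + [s[i:i+4] for i in range(r, len(s), 4)]
def pvGroupB (s : List Char) : List Char :=
  let r : Nat := s.length % 4
  let chunks :=
    (if r ≠ 0 then [PySem.List.slice s none (some (r : Int))] else []) ++
    ((PySem.List.pyRange (r : Int) (s.length : Int) 4).map
      (fun i => PySem.List.slice s (some i) (some (i + 4))))
  PySem.Chars.join [' '] chunks

def format_dec_bin_str_as_bytes_alt (bin_str : String) : String :=
  let parts := (PySem.Chars.split? bin_str.toList ['.']).getD []
  String.ofList (pvGroupB ((PySem.List.pyGet? parts 0).getD []) ++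
                 '.' :: pvGroupB ((PySem.List.pyGet? parts 1).getD []))

-- ===== PRECONDITION & SPEC =====
-- Pre_ excludes strings with no '.', on which A raises IndexError at parts[1] (B raises there too).
def Pre_format_dec_bin_str_as_bytes (bin_str : String) : Prop := '.' ∈ bin_str.toList
instance (bin_str : String) : Decidable (Pre_format_dec_bin_str_as_bytes bin_str) := by
  unfold Pre_format_dec_bin_str_as_bytes; infer_instance

def pvWitness_format_dec_bin_str_as_bytes : String := "10001.110111"

def Spec_format_dec_bin_str_as_bytes (bin_str : String) (out : String) : Prop := out = format_dec_bin_str_as_bytes_alt bin_str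
instance (bin_str : String) (out : String) : Decidable (Spec_format_dec_bin_str_as_bytes bin_str out) := by unfold Spec_format_dec_bin_str_as_bytes; infer_instance

-- ===== CLAIM (what is proved, stated in full; the proofs are below) =====
def Claim_equal_format_dec_bin_str_as_bytes : Prop := ∀ (bin_str : String), Dom_format_dec_bin_str_as_bytes bin_str → Pre_format_dec_bin_str_as_bytes bin_str → Spec_format_dec_bin_str_as_bytes bin_str (format_dec_bin_str_as_bytes bin_str)

-- ===== LEMMAS AND PROOFS =====

def pvChunks4 : List Char → List (List Char)
  | [] => []
  | c :: l => (c :: l).take 4 :: pvChunks4 (l.drop 3)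
termination_by s => s.length
decreasing_by simp

lemma pvChunks4_cons (c : Char) (l : List Char) :
    pvChunks4 (c :: l) = (c :: l).take 4 :: pvChunks4 ((c :: l).drop 4) := by
  conv_lhs => rw [pvChunks4]
  simp

lemma pyRange4_eq_nil {a b : Int} (h : b ≤ a) : PySem.List.pyRange a b 4 = [] := by
  simp [PySem.List.pyRange, show ¬(a < b) by omega]

lemma pyRange4_cons {a b : Int} (h : a < b) :
    PySem.List.pyRange a b 4 = a :: PySem.List.pyRange (a + 4) b 4 := by
  simp only [PySem.List.pyRange, if_neg (by norm_num : ¬(4:Int) = 0), if_pos (by norm_num : (0:Int) < 4), if_pos h]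
  by_cases h4 : a + 4 < b
  · rw [if_pos h4]
    have hn : ((b - a + 4 - 1) / 4).toNat = ((b - (a+4) + 4 - 1) / 4).toNat + 1 := by omega
    rw [hn, List.range_succ_eq_map, List.map_cons, List.map_map]
    refine congrArg₂ List.cons (by simp) ?_
    apply List.map_congr_left; intro k _; simp [Function.comp]; ring
  · rw [if_neg h4]
    have hn : ((b - a + 4 - 1) / 4).toNat = 1 := by omega
    rw [hn]
    simp

lemma pvMapSlices (pre t : List Char) :
    (PySem.List.pyRange (pre.length : Int) ((pre.length + t.length : Nat) : Int) 4).map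
      (fun i => PySem.List.slice (pre ++ t) (some i) (some (i + 4))) = pvChunks4 t := by
  induction ht : t.length using Nat.strong_induction_on generalizing pre t with
  | _ n ih =>
  cases t with
  | nil =>
    have hn0 : n = 0 := by simpa using ht.symm
    subst hn0
    rw [pvChunks4, pyRange4_eq_nil (by omega)]
    simp
  | cons c l =>
    subst ht
    have hlt : (pre.length : Int) < ((pre.length + (c :: l).length : Nat) : Int) := by
      simp only [List.length_cons]; push_cast; omega
    rw [pyRange4_cons hlt, List.map_cons, pvChunks4_cons]
    have h1 : PySem.List.slice (pre ++ c :: l) (some (pre.length : Int))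
        (some ((pre.length : Int) + 4)) = (c :: l).take 4 := by
      have := PySem.List.slice_natCast_add (pre ++ c :: l) pre.length 4
      simpa using this
    rw [h1]
    refine congrArg₂ List.cons rfl ?_
    have key := ih ((c :: l).drop 4).length (by simp only [List.length_drop, List.length_cons]; omega) (pre ++ (c :: l).take 4) ((c :: l).drop 4) rfl
    have e1 : pre ++ (c :: l).take 4 ++ (c :: l).drop 4 = pre ++ c :: l := by
      simp
    by_cases h4 : 4 ≤ (c :: l).length
    all_goals simp only [List.length_cons] at h4
    · have e2 : ((pre ++ (c :: l).take 4).length : Int) = (pre.length : Int) + 4 := by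
        simp only [List.length_append, List.length_take, List.length_cons]; push_cast; omega
      have e3 : (((pre ++ (c :: l).take 4).length + ((c :: l).drop 4).length : Nat) : Int)
          = ((pre.length + (c :: l).length : Nat) : Int) := by
        simp only [List.length_append, List.length_take, List.length_drop, List.length_cons]
        push_cast; omega
      rw [e1, e2, e3] at key
      exact key
    · -- short tail: range is empty and drop 4 is empty
      have hd : (c :: l).drop 4 = [] := by
        apply List.drop_eq_nil_of_le; simp only [List.length_cons]; omega
      rw [hd, pvChunks4]
      rw [pyRange4_eq_nil (by simp only [List.length_cons]; push_cast; omega)]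
      simp

lemma pvJoinSnoc (c : Char) (x b : List Char) (A : List (List Char)) :
    PySem.Chars.join [c] ((x :: A) ++ [b]) = PySem.Chars.join [c] (x :: A) ++ c :: b := by
  induction A generalizing x with
  | nil => simp [PySem.Chars.join, List.intercalate]
  | cons y t ih =>
    have h1 : PySem.Chars.join [c] (x :: y :: (t ++ [b])) = x ++ c :: PySem.Chars.join [c] (y :: (t ++ [b])) := by
      simpa using PySem.Chars.join_cons_cons [c] x y (t ++ [b])
    have h2 : PySem.Chars.join [c] (x :: y :: t) = x ++ c :: PySem.Chars.join [c] (y :: t) := by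
      simpa using PySem.Chars.join_cons_cons [c] x y t
    simp only [List.cons_append] at *
    rw [h1, ih y, h2]
    simp

lemma pvJoinReverse (c : Char) (L : List (List Char)) :
    (PySem.Chars.join [c] L).reverse = PySem.Chars.join [c] (L.reverse.map List.reverse) := by
  induction L with
  | nil => simp [PySem.Chars.join, List.intercalate]
  | cons x t ih =>
    cases t with
    | nil => simp [PySem.Chars.join, List.intercalate]
    | cons y t' =>
      have h1 : PySem.Chars.join [c] (x :: y :: t') = x ++ c :: PySem.Chars.join [c] (y :: t') := by
        simpa using PySem.Chars.join_cons_cons [c] x y t'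
      rw [h1]
      have hne : (y :: t').reverse.map List.reverse ≠ [] := by simp
      obtain ⟨z, B, hzB⟩ := List.exists_cons_of_ne_nil hne
      rw [show ((x :: y :: t').reverse.map List.reverse) = ((y :: t').reverse.map List.reverse) ++ [x.reverse] by simp]
      rw [hzB, pvJoinSnoc, ← hzB, ← ih]
      simp

def pvRight (s : List Char) : List (List Char) :=
  (if s.length % 4 ≠ 0 then [s.take (s.length % 4)] else []) ++
  pvChunks4 (s.drop (s.length % 4))

lemma pvChunks4_append_mod (x y : List Char) (h : x.length % 4 = 0) :
    pvChunks4 (x ++ y) = pvChunks4 x ++ pvChunks4 y := by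
  induction hx : x.length using Nat.strong_induction_on generalizing x with
  | _ n ih =>
  cases x with
  | nil => simp [pvChunks4]
  | cons c l =>
    subst hx
    simp only [List.length_cons] at h
    have h4 : 4 ≤ (c :: l).length := by simp only [List.length_cons]; omega
    have ht : ((c :: l) ++ y).take 4 = (c :: l).take 4 := List.take_append_of_le_length h4
    have hd : ((c :: l) ++ y).drop 4 = (c :: l).drop 4 ++ y := List.drop_append_of_le_length h4
    rw [show (c :: l) ++ y = c :: (l ++ y) from rfl, pvChunks4_cons,
        show c :: (l ++ y) = (c :: l) ++ y from rfl, ht, hd,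
        ih ((c :: l).drop 4).length (by simp only [List.length_drop, List.length_cons]; omega)
          _ (by simp only [List.length_drop, List.length_cons]; omega) rfl,
        pvChunks4_cons]
    simp

lemma pvChunks4_short (s : List Char) (h0 : s ≠ []) (h4 : s.length ≤ 4) :
    pvChunks4 s = [s] := by
  cases s with
  | nil => simp at h0
  | cons c l =>
    rw [pvChunks4_cons]
    have : (c :: l).take 4 = c :: l := List.take_of_length_le h4
    rw [this, List.drop_eq_nil_of_le h4, pvChunks4]

lemma pvChunksRev (s : List Char) :
    (pvChunks4 s.reverse).reverse.map List.reverse = pvRight s := by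
  induction hs : s.length using Nat.strong_induction_on generalizing s with
  | _ n ih =>
  by_cases h0 : s = []
  · subst h0; simp [pvChunks4, pvRight]
  by_cases h4 : s.length ≤ 4
  · -- one chunk
    have hrev : pvChunks4 s.reverse = [s.reverse] :=
      pvChunks4_short _ (by simpa using h0) (by simpa using h4)
    rw [hrev]
    unfold pvRight
    have hlen : 0 < s.length := List.length_pos_of_ne_nil h0
    by_cases hm : s.length % 4 = 0
    · have : s.length = 4 := by omega
      rw [hm]
      simp [pvChunks4_short s h0 (by omega)]
    · have hr : s.length % 4 = s.length := Nat.mod_eq_of_lt (by omega)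
      rw [if_pos hm, hr]
      simp [List.take_of_length_le (le_refl _), List.drop_eq_nil_of_le (le_refl _), pvChunks4]
  · -- s.length > 4 : peel the last 4 characters
    have h5 : 4 < s.length := by omega
    set m := s.length - 4 with hm
    have hsplit : s = s.take m ++ s.drop m := (List.take_append_drop m s).symm
    have hdlen : (s.drop m).length = 4 := by simp [hm]; omega
    have htlen : (s.take m).length = m := by simp; omega
    have hrev : s.reverse = (s.drop m).reverse ++ (s.take m).reverse := by
      conv_lhs => rw [hsplit]
      simp
    have hchunk : pvChunks4 s.reverse = (s.drop m).reverse :: pvChunks4 ((s.take m).reverse) := by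
      rw [hrev]
      obtain ⟨c, l, hcl⟩ := List.exists_cons_of_ne_nil (show (s.drop m).reverse ≠ [] by
        simp only [ne_eq, List.reverse_eq_nil_iff]
        apply List.ne_nil_of_length_pos; rw [hdlen]; omega)
      rw [hcl, List.cons_append, pvChunks4_cons, ← List.cons_append]
      have hlen4 : ((s.drop m).reverse).length = 4 := by simp [hdlen]
      rw [← hcl, List.take_append_of_le_length (by omega), List.drop_append_of_le_length (by omega)]
      rw [List.take_of_length_le (l := (s.drop m).reverse) (by omega),
          List.drop_eq_nil_of_le (as := (s.drop m).reverse) (by omega)]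
      simp
    have hmod : s.length % 4 = m % 4 := by omega
    have hIH : (pvChunks4 (s.take m).reverse).reverse.map List.reverse = pvRight (s.take m) :=
      ih m (by omega) _ htlen
    have e1 : s.take (s.length % 4) = (s.take m).take (s.length % 4) := by
      rw [List.take_take]
      congr 1
      omega
    have e2 : s.drop (s.length % 4) = (s.take m).drop (s.length % 4) ++ s.drop m := by
      have h := List.drop_append_of_le_length (l₁ := s.take m) (l₂ := s.drop m)
        (i := s.length % 4) (by rw [htlen]; omega)
      rwa [← hsplit] at h
    have hmodlen : ((s.take m).drop (s.length % 4)).length % 4 = 0 := by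
      rw [List.length_drop, htlen]; omega
    have hne : s.drop m ≠ [] := by
      apply List.ne_nil_of_length_pos; rw [hdlen]; omega
    have hkey : pvRight s = pvRight (s.take m) ++ [s.drop m] := by
      unfold pvRight
      rw [htlen, ← hmod, e1, e2, pvChunks4_append_mod _ _ hmodlen,
          pvChunks4_short (s.drop m) hne (by omega)]
      simp
    rw [hchunk, hkey, ← hIH]
    simp

lemma pvGroupA_eq (s : List Char) : pvGroupA s = PySem.Chars.join [' '] (pvChunks4 s) := by
  unfold pvGroupA
  have h := pvMapSlices [] s
  simp only [List.nil_append, List.length_nil, Nat.cast_zero, zero_add] at h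
  rw [h]

lemma pvGroupB_eq (s : List Char) : pvGroupB s = PySem.Chars.join [' '] (pvRight s) := by
  simp only [pvGroupB, pvRight]
  have h := pvMapSlices (s.take (s.length % 4)) (s.drop (s.length % 4))
  rw [List.take_append_drop,
      show (s.take (s.length % 4)).length = s.length % 4 by
        rw [List.length_take]; exact Nat.min_eq_left (Nat.mod_le _ _),
      show s.length % 4 + (s.drop (s.length % 4)).length = s.length by
        rw [List.length_drop]; have := Nat.mod_le s.length 4; omega] at h
  rw [h, PySem.List.slice_to_natCast]

lemma pvGroupAB (s : List Char) : (pvGroupA s.reverse).reverse = pvGroupB s := by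
  rw [pvGroupA_eq, pvJoinReverse, pvChunksRev, ← pvGroupB_eq]

-- ===== VERDICT (by name: the statement is the Claim_ definition above) =====
theorem format_dec_bin_str_as_bytes_spec : Claim_equal_format_dec_bin_str_as_bytes := by
  intro bin_str _ _
  unfold Spec_format_dec_bin_str_as_bytes format_dec_bin_str_as_bytes format_dec_bin_str_as_bytes_alt
  simp only [pvGroupAB]
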